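-- pv_equiv track=rewrite | github.com/zebernst/cosmere-social-network | character.py | replace_delimiter
-- ===== SOURCE A (Python) =====
-- def replace_delimiter(s: str):
--     brace, bracket = 0, 0
--     sanitized = []
--     for char in s:
--         if char == '{':
--             brace += 1
--         elif char == '[':
--             bracket += 1
--         elif char == '}':
--             brace -= 1
--         elif char == ']':
--             bracket -= 1
--
--         if char in ('|', '=') and (brace > 0 or bracket > 0):
--             sanitized.append(':')
--         else:
--             sanitized.append(char)
--
--     return "".join(sanitized)
-- ===== SOURCE B (Python) =====
-- def replace_delimiter(s: str):
--     # Chunk-based scanner: jump from delimiter to delimiter with str.find,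
--     # rewriting whole in-between chunks with str.replace instead of deciding per character.
--     out = []
--     brace = bracket = 0
--     pos = 0
--     while True:
--         hits = [i for i in (s.find(d, pos) for d in '{}[]') if i != -1]
--         if not hits:
--             chunk = s[pos:]
--             if brace > 0 or bracket > 0:
--                 chunk = chunk.replace('|', ':').replace('=', ':')
--             out.append(chunk)
--             break
--         nxt = min(hits)
--         chunk = s[pos:nxt]
--         if brace > 0 or bracket > 0:
--             chunk = chunk.replace('|', ':').replace('=', ':')
--         out.append(chunk)
--         d = s[nxt]
--         if d == '{':
--             brace += 1
--         elif d == '}':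
--             brace -= 1
--         elif d == '[':
--             bracket += 1
--         else:
--             bracket -= 1
--         out.append(d)
--         pos = nxt + 1
--     return "".join(out)
-- ===== Notes on version B (the rewrite author's own statement) =====
-- stated objective: faster
-- what changed: B is a chunk scanner: it jumps from delimiter to delimiter with str.find, rewrites each whole in-between chunk with str.replace when the scanner is inside braces/brackets, and updates the two counters only at delimiter positions, instead of A's per-character loop that updates counters and decides every character individually.
import Mathlib
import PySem

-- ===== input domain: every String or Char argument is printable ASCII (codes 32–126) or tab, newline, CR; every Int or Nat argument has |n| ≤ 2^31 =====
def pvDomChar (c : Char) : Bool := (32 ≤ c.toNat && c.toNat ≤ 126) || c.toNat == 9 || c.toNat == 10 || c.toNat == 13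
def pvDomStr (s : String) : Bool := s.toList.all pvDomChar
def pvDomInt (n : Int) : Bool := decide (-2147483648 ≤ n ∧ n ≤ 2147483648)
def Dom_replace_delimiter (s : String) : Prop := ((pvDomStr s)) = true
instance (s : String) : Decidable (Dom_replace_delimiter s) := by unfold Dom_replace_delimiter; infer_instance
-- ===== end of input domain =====

-- B replaces A's per-character loop by a chunk scanner: jump to the next delimiter,
-- rewrite the whole chunk in between with replace when inside, update counters only at delimiters.

-- ===== PORT A =====
-- A's loop: carry the two counters through the characters, emitting one char each step.
def replace_delimiter_go (cs : List Char) (brace bracket : Int) : List Char :=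
  match cs with
  | [] => []
  | c :: rest =>
    -- the if/elif chain updating the counters
    let brace' := if c = '{' then brace + 1 else brace
    let bracket' := if c = '{' then bracket else if c = '[' then bracket + 1 else bracket
    let brace'' := if c = '{' ∨ c = '[' then brace' else if c = '}' then brace' - 1 else brace'
    let bracket'' := if c = '{' ∨ c = '[' ∨ c = '}' then bracket' else if c = ']' then bracket' - 1 else bracket'
    let out := if (c = '|' ∨ c = '=') ∧ (brace'' > 0 ∨ bracket'' > 0) then ':' else c
    out :: replace_delimiter_go rest brace'' bracket''

def replace_delimiter (s : String) : String :=
  String.ofList (replace_delimiter_go s.toList 0 0)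

-- ===== PORT B =====
def isDelim (c : Char) : Bool := c = '{' || c = '}' || c = '[' || c = ']'

-- chunk.replace('|', ':').replace('=', ':') — exact for single-character patterns:
-- str.replace with a 1-char pattern maps each occurrence independently.
def sanitizeChunk (chunk : List Char) : List Char :=
  (chunk.map (fun c => if c = '|' then ':' else c)).map (fun c => if c = '=' then ':' else c)

-- The Source B while-loop: "find the next delimiter" = split at the first delimiter
-- (takeWhile/dropWhile = the s.find + slice step), emit the (possibly rewritten)
-- chunk, update a counter at the delimiter, continue after it.
def altGo (cs : List Char) (brace bracket : Int) : List Char :=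
  let chunk := cs.takeWhile (fun c => !isDelim c)
  let chunk' := if brace > 0 ∨ bracket > 0 then sanitizeChunk chunk else chunk
  match h : cs.dropWhile (fun c => !isDelim c) with
  | [] => chunk'
  | d :: rest =>
    let brace' := if d = '{' then brace + 1 else if d = '}' then brace - 1 else brace
    let bracket' := if d = '[' then bracket + 1 else if d = ']' then bracket - 1 else bracket
    chunk' ++ d :: altGo rest brace' bracket'
termination_by cs.length
decreasing_by
  have h1 : (cs.dropWhile (fun c => !isDelim c)).length ≤ cs.length :=
    List.length_dropWhile_le _ _
  rw [h] at h1
  simp at h1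
  omega

def replace_delimiter_alt (s : String) : String :=
  String.ofList (altGo s.toList 0 0)

-- ===== PRECONDITION & SPEC =====
def Spec_replace_delimiter (s : String) (out : String) : Prop := out = replace_delimiter_alt s
instance (s : String) (out : String) : Decidable (Spec_replace_delimiter s out) := by unfold Spec_replace_delimiter; infer_instance

-- ===== CLAIM (what is proved, stated in full; the proofs are below) =====
def Claim_equal_replace_delimiter : Prop := ∀ (s : String), Dom_replace_delimiter s → Spec_replace_delimiter s (replace_delimiter s)

-- ===== LEMMAS AND PROOFS =====

theorem sanitizeChunk_cons (c : Char) (l : List Char) :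
    sanitizeChunk (c :: l) =
      (if (if c = '|' then ':' else c) = '=' then ':' else (if c = '|' then ':' else c)) :: sanitizeChunk l := by
  simp [sanitizeChunk]

theorem altGo_unfold (cs : List Char) (b k : Int) :
    altGo cs b k =
      (if b > 0 ∨ k > 0 then sanitizeChunk (cs.takeWhile (fun c => !isDelim c))
       else cs.takeWhile (fun c => !isDelim c)) ++
      (match cs.dropWhile (fun c => !isDelim c) with
       | [] => []
       | d :: rest =>
         d :: altGo rest (if d = '{' then b + 1 else if d = '}' then b - 1 else b)
                         (if d = '[' then k + 1 else if d = ']' then k - 1 else k)) := by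
  rw [altGo]
  split
  case h_1 heq => rw [heq]; simp
  case h_2 d rest heq => rw [heq]

theorem altGo_cons_delim (c : Char) (cs : List Char) (b k : Int) (h : isDelim c = true) :
    altGo (c :: cs) b k =
      c :: altGo cs (if c = '{' then b + 1 else if c = '}' then b - 1 else b)
                    (if c = '[' then k + 1 else if c = ']' then k - 1 else k) := by
  have hdw : List.dropWhile (fun c => !isDelim c) (c :: cs) = c :: cs := by
    simp [h]
  have ht : List.takeWhile (fun c => !isDelim c) (c :: cs) = [] := by
    simp [h]
  rw [altGo_unfold, hdw, ht]
  simp [sanitizeChunk]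

theorem altGo_cons_nondelim (c : Char) (cs : List Char) (b k : Int) (h : isDelim c = false) :
    altGo (c :: cs) b k =
      (if b > 0 ∨ k > 0 then
        (if (if c = '|' then ':' else c) = '=' then ':' else (if c = '|' then ':' else c))
       else c) :: altGo cs b k := by
  have hdw : List.dropWhile (fun c => !isDelim c) (c :: cs) =
      List.dropWhile (fun c => !isDelim c) cs := by
    simp [h]
  have ht : List.takeWhile (fun c => !isDelim c) (c :: cs) =
      c :: List.takeWhile (fun c => !isDelim c) cs := by
    simp [h]
  rw [altGo_unfold (c :: cs), altGo_unfold cs, hdw, ht]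
  by_cases hin : b > 0 ∨ k > 0 <;> simp [hin, sanitizeChunk_cons]

theorem alt_eq_go (cs : List Char) (b k : Int) :
    altGo cs b k = replace_delimiter_go cs b k := by
  induction cs generalizing b k with
  | nil => rw [altGo]; simp [replace_delimiter_go, sanitizeChunk]
  | cons c rest ih =>
    by_cases h : isDelim c = true
    · have hchar : ((c = '{' ∨ c = '}') ∨ c = '[') ∨ c = ']' := by
        simpa [isDelim] using h
      rw [altGo_cons_delim c rest b k h]
      rcases hchar with ((h1 | h1) | h1) | h1 <;>
        subst h1 <;> simp [replace_delimiter_go, ih]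
    · have h' : isDelim c = false := by simpa using h
      have h1 : ¬ c = '{' := fun hc => by subst hc; simp [isDelim] at h'
      have h2 : ¬ c = '}' := fun hc => by subst hc; simp [isDelim] at h'
      have h3 : ¬ c = '[' := fun hc => by subst hc; simp [isDelim] at h'
      have h4 : ¬ c = ']' := fun hc => by subst hc; simp [isDelim] at h'
      rw [altGo_cons_nondelim c rest b k h']
      simp only [replace_delimiter_go, h1, h2, h3, h4, if_false]
      rw [ih]
      congr 1
      by_cases hin : b > 0 ∨ k > 0
      · by_cases hp : c = '|'
        · subst hp; simp [hin]
        · by_cases he : c = '='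
          · subst he; simp [hin]
          · simp [hin, hp, he]
      · simp [hin]

-- ===== VERDICT (by name: the statement is the Claim_ definition above) =====
theorem replace_delimiter_spec : Claim_equal_replace_delimiter := by
  intro s _
  unfold Spec_replace_delimiter replace_delimiter replace_delimiter_alt
  rw [alt_eq_go]
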